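-- pv_equiv track=rewrite | github.com/manas-17045/LeetcodeSolutions | Leetcode 3801-3900/3819/3819.py | rotateElements
-- ===== SOURCE A (Python) =====
-- def rotateElements(nums: list[int], k: int) -> list[int]:
--     """
--     Rotates non-negative elements in the list by k positions to the left,
--     while keeping negative elements in their original positions.
--
--     Args:
--         nums (list[int]): The input list of integers.
--         k (int): The number of positions to rotate.
--
--     Returns:
--         list[int]: The list with rotated non-negative elements.
--     """
--     nonNegativeList = [num for num in nums if num >= 0]
--     count = len(nonNegativeList)
--
--     if count == 0:
--         return nums
--
--     k %= count
--     rotatedNonNegative = nonNegativeList[k:] + nonNegativeList[:k]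
--
--     resultList = []
--     pointerIndex = 0
--
--     for num in nums:
--         if num < 0:
--             resultList.append(num)
--         else:
--             resultList.append(rotatedNonNegative[pointerIndex])
--             pointerIndex += 1
--
--     return resultList
-- ===== SOURCE B (Python) =====
-- def rotateElements(nums: list[int], k: int) -> list[int]:
--     """Three-reversal rotation: rotate the non-negative values left by k using
--     the classic reverse(first k) + reverse(rest) + reverse(whole) trick, then
--     refill the non-negative slots by consuming an iterator in a comprehension."""
--     nn = [x for x in nums if x >= 0]
--     count = len(nn)
--     if count == 0:
--         return nums
--     k %= count
--     nn[:k] = reversed(nn[:k])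
--     nn[k:] = reversed(nn[k:])
--     nn.reverse()
--     it = iter(nn)
--     return [x if x < 0 else next(it) for x in nums]
-- ===== Notes on version B (the rewrite author's own statement) =====
-- stated objective: alternative
-- what changed: B rotates the non-negative values with the classic three-reversal algorithm (reverse the first k, reverse the rest, reverse the whole) instead of concatenating the slices nn[k:]+nn[:k], and refills the non-negative slots by consuming an iterator inside a comprehension instead of A's explicit pointer-index merge loop.
import Mathlib
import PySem

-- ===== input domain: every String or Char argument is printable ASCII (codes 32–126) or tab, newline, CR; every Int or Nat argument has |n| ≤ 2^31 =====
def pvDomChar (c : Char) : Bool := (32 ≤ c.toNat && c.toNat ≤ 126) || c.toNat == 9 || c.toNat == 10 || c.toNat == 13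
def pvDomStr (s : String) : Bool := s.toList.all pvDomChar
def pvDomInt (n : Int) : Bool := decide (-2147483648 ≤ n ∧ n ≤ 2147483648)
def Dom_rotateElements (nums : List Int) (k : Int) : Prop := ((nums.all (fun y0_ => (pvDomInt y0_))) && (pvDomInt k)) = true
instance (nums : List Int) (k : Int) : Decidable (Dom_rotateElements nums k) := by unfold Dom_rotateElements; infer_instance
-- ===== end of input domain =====

-- B replaces A's slice-concatenation rotation and pointer-index merge loop by the
-- classic three-reversal rotation plus an iterator-consuming refill (objective: alternative).

-- ===== PORT A =====
def rotateElements (nums : List Int) (k : Int) : List Int :=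
  let nonNegativeList := nums.filter (fun num => decide (num ≥ 0))
  let count : Int := nonNegativeList.length
  if count == 0 then nums
  else
    let k' := PySem.Int.mod k count
    let rotatedNonNegative := PySem.List.slice nonNegativeList (some k') none
        ++ PySem.List.slice nonNegativeList none (some k')
    -- pointerIndex never leaves [0, count), so the index is always in range (pyGetD is exact here)
    (nums.foldl (fun (st : List Int × Int) num =>
      if num < 0 then (st.1 ++ [num], st.2)
      else (st.1 ++ [PySem.List.pyGetD rotatedNonNegative st.2 0], st.2 + 1)) ([], 0)).1

-- ===== PORT B =====
-- the refill comprehension: 'x if x < 0 else next(it)'; next(it) never exhausts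
-- (rot carries exactly one value per non-negative slot), so headD/tail is exact here
def pvFill (xs : List Int) (rot : List Int) : List Int :=
  match xs with
  | [] => []
  | x :: xs => if x < 0 then x :: pvFill xs rot else rot.headD 0 :: pvFill xs rot.tail

def rotateElements_alt (nums : List Int) (k : Int) : List Int :=
  let nn := nums.filter (fun x => decide (x ≥ 0))
  let count : Int := nn.length
  if count == 0 then nums
  else
    let k' := PySem.Int.mod k count
    -- nn[:k] = reversed(nn[:k]); nn[k:] = reversed(nn[k:]); nn.reverse()
    let rot := ((PySem.List.slice nn none (some k')).reverse
        ++ (PySem.List.slice nn (some k') none).reverse).reverse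
    pvFill nums rot

-- ===== PRECONDITION & SPEC =====
def Spec_rotateElements (nums : List Int) (k : Int) (out : List Int) : Prop := out = rotateElements_alt nums k
instance (nums : List Int) (k : Int) (out : List Int) : Decidable (Spec_rotateElements nums k out) := by unfold Spec_rotateElements; infer_instance

-- ===== CLAIM (what is proved, stated in full; the proofs are below) =====
def Claim_equal_rotateElements : Prop := ∀ (nums : List Int) (k : Int), Dom_rotateElements nums k → Spec_rotateElements nums k (rotateElements nums k)

-- ===== LEMMAS AND PROOFS =====

-- A's merge loop as a structural recursion (rot fixed)
def pvGoA (rot : List Int) (xs : List Int) (r : Nat) : List Int :=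
  match xs with
  | [] => []
  | x :: xs => if x < 0 then x :: pvGoA rot xs r
               else PySem.List.pyGetD rot (r : Int) 0 :: pvGoA rot xs (r+1)

-- A's fold is pvGoA
theorem pvA1 (rot : List Int) (xs : List Int) (acc : List Int) (r : Nat) :
    (xs.foldl (fun (st : List Int × Int) num =>
      if num < 0 then (st.1 ++ [num], st.2)
      else (st.1 ++ [PySem.List.pyGetD rot st.2 0], st.2 + 1)) (acc, (r : Int))).1
    = acc ++ pvGoA rot xs r := by
  induction xs generalizing acc r with
  | nil => simp [pvGoA]
  | cons x xs ih =>
    simp only [List.foldl_cons, pvGoA]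
    by_cases h : x < 0
    · simp only [h, if_pos]
      rw [ih]
      simp
    · simp only [h, if_neg, not_false_iff]
      have : (r : Int) + 1 = ((r + 1 : Nat) : Int) := by push_cast; ring
      rw [this, ih]
      simp

theorem pvGetD_drop (l : List Int) (r : Nat) : l.getD r 0 = (l.drop r).headD 0 := by
  simp [List.head?_eq_getElem?, List.getElem?_drop,
    List.getD_eq_getElem?_getD]

-- indexing from rank r is the same as consuming the iterator l.drop r
theorem pvGoA_fill (rot : List Int) (xs : List Int) (r : Nat) :
    pvGoA rot xs r = pvFill xs (rot.drop r) := by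
  induction xs generalizing r with
  | nil => rfl
  | cons x xs ih =>
    simp only [pvGoA, pvFill]
    by_cases h : x < 0
    · simp [h, ih]
    · rw [if_neg h, if_neg h, PySem.List.pyGetD_natCast, pvGetD_drop,
        List.tail_drop, ih (r+1)]

-- ===== VERDICT (by name: the statement is the Claim_ definition above) =====
theorem rotateElements_spec : Claim_equal_rotateElements := by
  intro nums k _
  unfold Spec_rotateElements rotateElements rotateElements_alt
  set nn := nums.filter (fun num => decide (num ≥ 0)) with hnn
  by_cases hc : ((nn.length : Int) == 0)
  · simp only [hc, if_pos]
  · simp only [hc, if_neg, Bool.false_eq_true, not_false_iff]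
    have hcpos : 0 < nn.length := by
      rcases Nat.eq_zero_or_pos nn.length with h | h
      · simp [h] at hc
      · exact h
    set k' := PySem.Int.mod k (nn.length : Int) with hk'
    have hk'0 : 0 ≤ k' := PySem.Int.mod_nonneg _ (by exact_mod_cast hcpos)
    rw [PySem.List.slice_from _ hk'0, PySem.List.slice_to _ hk'0]
    have hrot : ((nn.take k'.toNat).reverse ++ (nn.drop k'.toNat).reverse).reverse
        = nn.drop k'.toNat ++ nn.take k'.toNat := by
      simp
    rw [hrot]
    have hA := pvA1 (nn.drop k'.toNat ++ nn.take k'.toNat) nums [] 0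
    simp only [Nat.cast_zero, List.nil_append] at hA
    rw [hA, pvGoA_fill, List.drop_zero]
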